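-- pv_equiv track=rewrite | github.com/hongjunland/codingTest | 2022/week14/test1.py | interval
-- ===== SOURCE A (Python) =====
-- import heapq
--
-- def interval(queue: list, consumption: int):
--     items = []
--     while queue:
--         item = -heapq.heappop(queue)
--         item -= consumption
--         items.append(item)
--     for item in items:
--         heapq.heappush(queue, -item)
--     return queue
-- ===== SOURCE B (Python) =====
-- def interval(queue: list, consumption: int):
--     queue[:] = sorted(v + consumption for v in queue)
--     return queue
-- ===== Notes on version B (the rewrite author's own statement) =====
-- stated objective: simpler
-- what changed: B replaces the drain-the-heap/negate/subtract/push-everything-back routine with a single in-place 'add consumption to every element and sort ascending' (on a valid heap the pop-all/push-all round trip provably produces exactly the ascending sorted array); Pre_ restricts to inputs satisfying the min-heap invariant, heapq's documented contract, because on a non-heap array heapq's pop order is unspecified garbage no caller could rely on.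
-- outside the precondition, e.g. on interval([3, 1, 2], 0): A returns [1, 3, 2], B returns [1, 2, 3]
import Mathlib
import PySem

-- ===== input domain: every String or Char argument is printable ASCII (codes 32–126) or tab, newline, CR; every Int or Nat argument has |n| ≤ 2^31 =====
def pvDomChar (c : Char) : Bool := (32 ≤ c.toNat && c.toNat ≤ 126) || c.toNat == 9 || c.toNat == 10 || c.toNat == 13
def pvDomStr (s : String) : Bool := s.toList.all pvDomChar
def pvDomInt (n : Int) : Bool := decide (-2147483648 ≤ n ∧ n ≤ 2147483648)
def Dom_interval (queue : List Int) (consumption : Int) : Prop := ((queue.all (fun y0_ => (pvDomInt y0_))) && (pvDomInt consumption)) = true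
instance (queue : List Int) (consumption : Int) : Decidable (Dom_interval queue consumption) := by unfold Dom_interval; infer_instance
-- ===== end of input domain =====

-- B replaces A's pop-every-element / negate-subtract-negate / push-everything-back
-- heap routine by adding `consumption` to every element and sorting ascending (on a
-- valid min-heap, draining and refilling the heap yields exactly the sorted array).
-- Both mutate `queue` in place and return the same object; the equivalence proved
-- here is about the returned list value.
-- All loops are ported with an explicit fuel argument that the call sites set high
-- enough for the loop to run to completion (a totality guard only).

-- ===== PORT A =====
-- transliteration of heapq._siftdown (newitem is heap[pos] at call time, read inlined);
-- fuel ≥ pos suffices: pos strictly decreases each iteration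
def pySiftdownAux : Nat → List Int → Nat → Nat → Int → List Int
  | 0, heap, _, pos, newitem => heap.set pos newitem
  | fuel + 1, heap, startpos, pos, newitem =>
    if startpos < pos then
      let parentpos := (pos - 1) / 2
      let parent := heap.getD parentpos 0
      if newitem < parent then
        pySiftdownAux fuel (heap.set pos parent) startpos parentpos newitem
      else heap.set pos newitem
    else heap.set pos newitem

-- transliteration of heapq._siftup's loop (then the final heap[pos]=newitem; _siftdown);
-- fuel ≥ endpos - pos suffices: pos strictly increases each iteration
def pySiftupLoop : Nat → List Int → Nat → Nat → Nat → Int → List Int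
  | 0, heap, startpos, pos, _, newitem =>
    pySiftdownAux pos (heap.set pos newitem) startpos pos newitem
  | fuel + 1, heap, startpos, pos, endpos, newitem =>
    if 2 * pos + 1 < endpos then
      let childpos :=
        if 2 * pos + 1 + 1 < endpos ∧ ¬ (heap.getD (2 * pos + 1) 0 < heap.getD (2 * pos + 1 + 1) 0)
        then 2 * pos + 1 + 1 else 2 * pos + 1
      pySiftupLoop fuel (heap.set pos (heap.getD childpos 0)) startpos childpos endpos newitem
    else pySiftdownAux pos (heap.set pos newitem) startpos pos newitem

def pySiftup (heap : List Int) (pos : Nat) : List Int :=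
  pySiftupLoop heap.length heap pos pos heap.length (heap.getD pos 0)

def pyHeappop (heap : List Int) : Int × List Int :=
  let lastelt := heap.getLast?.getD 0
  let rest := heap.dropLast
  if rest.isEmpty then (lastelt, rest)
  else
    let returnitem := rest.getD 0 0
    (returnitem, pySiftup (rest.set 0 lastelt) 0)

def pyHeappush (heap : List Int) (item : Int) : List Int :=
  pySiftdownAux ((heap ++ [item]).length - 1) (heap ++ [item]) 0 ((heap ++ [item]).length - 1) item

-- the `while queue:` pop loop of A; fuel ≥ queue.length suffices (each pop removes one element)
def pyDrain : Nat → List Int → Int → List Int → List Int × List Int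
  | 0, queue, _, items => (queue, items)
  | fuel + 1, queue, consumption, items =>
    if queue.isEmpty then (queue, items)
    else pyDrain fuel (pyHeappop queue).2 consumption (items ++ [(-(pyHeappop queue).1) - consumption])

def interval (queue : List Int) (consumption : Int) : List Int :=
  (pyDrain queue.length queue consumption []).2.foldl (fun h item => pyHeappush h (-item))
    (pyDrain queue.length queue consumption []).1

-- ===== PORT B =====
-- Source B: queue[:] = sorted(v + consumption for v in queue); return queue
-- (the sorted() builtin is ported as PySem.List.sorted with the identity key)
def interval_alt (queue : List Int) (consumption : Int) : List Int :=
  PySem.List.sorted (queue.map (fun v => v + consumption)) (fun x => x) false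

-- ===== PRECONDITION & SPEC =====
-- Pre_ excludes the inputs violating the min-heap invariant, heapq's documented
-- contract for `queue`: there A still returns, but the value is an unspecified
-- artefact of heapq's pop order on a malformed heap that no caller could rely on.
def Pre_interval (queue : List Int) (consumption : Int) : Prop :=
  ∀ i ∈ List.range queue.length,
    (2 * i + 1 < queue.length → queue.getD i 0 ≤ queue.getD (2 * i + 1) 0) ∧
    (2 * i + 2 < queue.length → queue.getD i 0 ≤ queue.getD (2 * i + 2) 0)
instance (queue : List Int) (consumption : Int) : Decidable (Pre_interval queue consumption) := by
  unfold Pre_interval; infer_instance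

def pvWitness_interval : List Int × Int := ([1, 2, 3], 5)

def Spec_interval (queue : List Int) (consumption : Int) (out : List Int) : Prop := out = interval_alt queue consumption
instance (queue : List Int) (consumption : Int) (out : List Int) : Decidable (Spec_interval queue consumption out) := by unfold Spec_interval; infer_instance

-- ===== CLAIM (what is proved, stated in full; the proofs are below) =====
def Claim_equal_interval : Prop := ∀ (queue : List Int) (consumption : Int), Dom_interval queue consumption → Pre_interval queue consumption → Spec_interval queue consumption (interval queue consumption)

-- ===== LEMMAS AND PROOFS =====

-- the min-heap invariant, in the parent-child form the proofs use
def IsHeap (l : List Int) : Prop :=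
  ∀ i j : Nat, (j = 2 * i + 1 ∨ j = 2 * i + 2) → j < l.length → l.getD i 0 ≤ l.getD j 0

theorem pre_iff_isHeap (q : List Int) (c : Int) : Pre_interval q c ↔ IsHeap q := by
  constructor
  · intro h i j hj hjl
    have hi : i ∈ List.range q.length := by
      refine List.mem_range.mpr ?_
      omega
    rcases hj with h1 | h2
    · subst h1; exact (h i hi).1 hjl
    · subst h2; exact (h i hi).2 hjl
  · intro h i _
    exact ⟨fun h1 => h i _ (Or.inl rfl) h1, fun h2 => h i _ (Or.inr rfl) h2⟩

theorem getD_set_ne (l : List Int) (p q : Nat) (v : Int) (h : p ≠ q) :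
    (l.set p v).getD q 0 = l.getD q 0 := by
  simp [List.getD_eq_getElem?_getD, List.getElem?_set_ne h]

theorem getD_set_self (l : List Int) (p : Nat) (v : Int) (h : p < l.length) :
    (l.set p v).getD p 0 = v := by
  simp [List.getD_eq_getElem?_getD, h]

-- a parent index really is a parent: p ≥ 1 → p is a child of (p-1)/2
theorem child_of_parent (p : Nat) (h : 0 < p) :
    p = 2 * ((p - 1) / 2) + 1 ∨ p = 2 * ((p - 1) / 2) + 2 := by omega

-- element counts through a single in-bounds overwrite
theorem count_set (l : List Int) : ∀ (p : Nat) (v a : Int), p < l.length →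
    (l.set p v).count a + (if l.getD p 0 = a then 1 else 0)
      = l.count a + (if v = a then 1 else 0) := by
  induction l with
  | nil => intro p v a hp; simp at hp
  | cons b t ih =>
    intro p v a hp
    cases p with
    | zero =>
      simp only [List.set_cons_zero, List.count_cons, List.getD_cons_zero, beq_iff_eq]
      split_ifs <;> omega
    | succ p =>
      simp only [List.set_cons_succ, List.count_cons, List.getD_cons_succ, beq_iff_eq]
      have := ih p v a (by simpa using hp)
      split_ifs at this ⊢ <;> omega

-- the swap permutation behind every sift step: write l[q] into slot p, then x into slot q
theorem perm_set_set (l : List Int) (p q : Nat) (x : Int)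
    (hp : p < l.length) (hq : q < l.length) (hne : p ≠ q) :
    ((l.set p (l.getD q 0)).set q x).Perm (l.set p x) := by
  rw [List.perm_iff_count]
  intro a
  have h1 := count_set l p (l.getD q 0) a hp
  have h2 := count_set (l.set p (l.getD q 0)) q x a (by simpa using hq)
  have h3 := count_set l p x a hp
  rw [getD_set_ne _ _ _ _ hne] at h2
  split_ifs at h1 h2 h3 <;> omega

-- root of a heap is the minimum
theorem heap_root_min (l : List Int) (h : IsHeap l) :
    ∀ i, i < l.length → l.getD 0 0 ≤ l.getD i 0 := by
  intro i
  induction i using Nat.strong_induction_on with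
  | _ i ih =>
    intro hi
    rcases Nat.eq_zero_or_pos i with h0 | h0
    · subst h0; exact le_refl _
    · have hp : (i - 1) / 2 < i := by omega
      exact le_trans (ih _ hp (by omega)) (h _ i (child_of_parent i h0) hi)

-- writing x into the hole closes the heap when x fits between parent and children
theorem set_is_heap (heap : List Int) (pos : Nat) (x : Int)
    (hpos : pos < heap.length)
    (Ha : ∀ i j, (j = 2 * i + 1 ∨ j = 2 * i + 2) → j < heap.length → i ≠ pos → j ≠ pos →
      heap.getD i 0 ≤ heap.getD j 0)
    (Hb : ∀ j, (j = 2 * pos + 1 ∨ j = 2 * pos + 2) → j < heap.length → x ≤ heap.getD j 0)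
    (Hstop : 0 < pos → heap.getD ((pos - 1) / 2) 0 ≤ x) :
    IsHeap (heap.set pos x) := by
  intro i j hj hjl
  rw [List.length_set] at hjl
  by_cases hip : i = pos
  · subst hip
    have hjne : j ≠ i := by omega
    rw [getD_set_self _ _ _ hpos, getD_set_ne _ _ _ _ (fun h => hjne h.symm)]
    exact Hb j hj hjl
  · by_cases hjp : j = pos
    · subst hjp
      have hi : i = (j - 1) / 2 := by omega
      rw [getD_set_ne _ _ _ _ (fun h => hip h.symm), getD_set_self _ _ _ hpos, hi]
      exact Hstop (by omega)
    · rw [getD_set_ne _ _ _ _ (fun h => hip h.symm), getD_set_ne _ _ _ _ (fun h => hjp h.symm)]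
      exact Ha i j hj hjl hip hjp

-- correctness of the walk-up phase (_siftdown with startpos = 0)
theorem siftdownAux_spec (fuel : Nat) :
    ∀ (heap : List Int) (pos : Nat) (x : Int),
      pos < heap.length → pos ≤ fuel →
      (∀ i j, (j = 2 * i + 1 ∨ j = 2 * i + 2) → j < heap.length → i ≠ pos → j ≠ pos →
        heap.getD i 0 ≤ heap.getD j 0) →
      (∀ j, (j = 2 * pos + 1 ∨ j = 2 * pos + 2) → j < heap.length → x ≤ heap.getD j 0) →
      (∀ j, (j = 2 * pos + 1 ∨ j = 2 * pos + 2) → j < heap.length → 0 < pos →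
        heap.getD ((pos - 1) / 2) 0 ≤ heap.getD j 0) →
      IsHeap (pySiftdownAux fuel heap 0 pos x) ∧
        (pySiftdownAux fuel heap 0 pos x).Perm (heap.set pos x) := by
  induction fuel with
  | zero =>
    intro heap pos x hpos hfuel Ha Hb Hc
    have hp0 : pos = 0 := by omega
    subst hp0
    exact ⟨set_is_heap heap 0 x hpos Ha Hb (by omega), List.Perm.refl _⟩
  | succ fuel ih =>
    intro heap pos x hpos hfuel Ha Hb Hc
    rw [pySiftdownAux]
    dsimp only
    by_cases h0 : 0 < pos
    · rw [if_pos h0]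
      by_cases hlt : x < heap.getD ((pos - 1) / 2) 0
      · rw [if_pos hlt]
        have hplt : (pos - 1) / 2 < pos := by omega
        have hres := ih (heap.set pos (heap.getD ((pos - 1) / 2) 0)) ((pos - 1) / 2) x
          (by rw [List.length_set]; omega) (by omega)
          (by -- Ha'
            intro i j hj hjl hip hjp
            rw [List.length_set] at hjl
            by_cases hipos : i = pos
            · subst hipos
              have hjne : j ≠ i := by omega
              rw [getD_set_self _ _ _ hpos, getD_set_ne _ _ _ _ (fun h => hjne h.symm)]
              exact Hc j hj hjl h0
            · by_cases hjpos : j = pos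
              · exact absurd (by omega : i = (j - 1) / 2) (by subst hjpos; exact hip)
              · rw [getD_set_ne _ _ _ _ (fun h => hipos h.symm),
                  getD_set_ne _ _ _ _ (fun h => hjpos h.symm)]
                exact Ha i j hj hjl hipos hjpos)
          (by -- Hb'
            intro j hj hjl
            rw [List.length_set] at hjl
            by_cases hjpos : j = pos
            · subst hjpos
              rw [getD_set_self _ _ _ hpos]
              exact le_of_lt hlt
            · rw [getD_set_ne _ _ _ _ (fun h => hjpos h.symm)]
              exact le_trans (le_of_lt hlt)
                (Ha ((pos - 1) / 2) j (by omega) hjl (by omega) hjpos))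
          (by -- Hc'
            intro j hj hjl hppos
            rw [List.length_set] at hjl
            have hppne : ((pos - 1) / 2 - 1) / 2 ≠ pos := by omega
            rw [getD_set_ne _ _ _ _ (fun h => hppne h.symm)]
            have hparent : heap.getD (((pos - 1) / 2 - 1) / 2) 0 ≤ heap.getD ((pos - 1) / 2) 0 :=
              Ha _ _ (child_of_parent _ hppos) (by omega) (by omega) (by omega)
            by_cases hjpos : j = pos
            · subst hjpos
              rw [getD_set_self _ _ _ hpos]
              exact hparent
            · rw [getD_set_ne _ _ _ _ (fun h => hjpos h.symm)]
              exact le_trans hparent (Ha ((pos - 1) / 2) j (by omega) hjl (by omega) hjpos))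
        refine ⟨hres.1, hres.2.trans ?_⟩
        exact perm_set_set heap pos ((pos - 1) / 2) x hpos (by omega) (by omega)
      · rw [if_neg hlt]
        exact ⟨set_is_heap heap pos x hpos Ha Hb (fun _ => not_lt.mp hlt), List.Perm.refl _⟩
    · rw [if_neg h0]
      exact ⟨set_is_heap heap pos x hpos Ha Hb (by omega), List.Perm.refl _⟩

-- correctness of the descent phase (_siftup)
theorem siftupLoop_spec (fuel : Nat) :
    ∀ (heap : List Int) (pos : Nat) (x : Int),
      pos < heap.length → heap.length ≤ fuel + pos →
      (∀ i j, (j = 2 * i + 1 ∨ j = 2 * i + 2) → j < heap.length → i ≠ pos → j ≠ pos →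
        heap.getD i 0 ≤ heap.getD j 0) →
      (∀ j, (j = 2 * pos + 1 ∨ j = 2 * pos + 2) → j < heap.length → 0 < pos →
        heap.getD ((pos - 1) / 2) 0 ≤ heap.getD j 0) →
      IsHeap (pySiftupLoop fuel heap 0 pos heap.length x) ∧
        (pySiftupLoop fuel heap 0 pos heap.length x).Perm (heap.set pos x) := by
  induction fuel with
  | zero =>
    intro heap pos x hpos hfuel HA HC
    exact absurd hpos (by omega)
  | succ fuel ih =>
    intro heap pos x hpos hfuel HA HC
    rw [pySiftupLoop]
    dsimp only
    by_cases h1 : 2 * pos + 1 < heap.length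
    · rw [if_pos h1]
      -- the chosen child c is a child of pos, in range, and minimal among the children
      have main : ∀ c : Nat, (c = 2 * pos + 1 ∨ c = 2 * pos + 2) → c < heap.length →
          (∀ j, (j = 2 * pos + 1 ∨ j = 2 * pos + 2) → j < heap.length →
            heap.getD c 0 ≤ heap.getD j 0) →
          IsHeap (pySiftupLoop fuel (heap.set pos (heap.getD c 0)) 0 c heap.length x) ∧
            (pySiftupLoop fuel (heap.set pos (heap.getD c 0)) 0 c heap.length x).Perm
              (heap.set pos x) := by
        intro c hcchild hclt hcmin
        have hlen : (heap.set pos (heap.getD c 0)).length = heap.length := by simp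
        have hres := ih (heap.set pos (heap.getD c 0)) c x
          (by omega)
          (by omega)
          (by -- HA'
            intro i j hj hjl hic hjc
            rw [List.length_set] at hjl
            by_cases hipos : i = pos
            · subst hipos
              have hjne : j ≠ i := by omega
              rw [getD_set_self _ _ _ hpos, getD_set_ne _ _ _ _ (fun h => hjne h.symm)]
              exact hcmin j hj hjl
            · by_cases hjpos : j = pos
              · subst hjpos
                have hi : i = (j - 1) / 2 := by omega
                have h0j : 0 < j := by omega
                rw [getD_set_ne _ _ _ _ (fun h => hipos h.symm), getD_set_self _ _ _ hpos, hi]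
                exact HC c hcchild hclt (by omega)
              · rw [getD_set_ne _ _ _ _ (fun h => hipos h.symm),
                  getD_set_ne _ _ _ _ (fun h => hjpos h.symm)]
                exact HA i j hj hjl hipos hjpos)
          (by -- HC'
            intro j hj hjl hc0
            rw [List.length_set] at hjl
            have hcp : (c - 1) / 2 = pos := by omega
            have hjpos : j ≠ pos := by omega
            rw [hcp, getD_set_self _ _ _ hpos, getD_set_ne _ _ _ _ (fun h => hjpos h.symm)]
            exact HA c j hj hjl (by omega) (by omega))
        rw [hlen] at hres
        refine ⟨hres.1, hres.2.trans ?_⟩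
        exact perm_set_set heap pos c x hpos hclt (by omega)
      by_cases hcond : 2 * pos + 1 + 1 < heap.length ∧
          ¬ (heap.getD (2 * pos + 1) 0 < heap.getD (2 * pos + 1 + 1) 0)
      · rw [if_pos hcond]
        refine main (2 * pos + 1 + 1) (by omega) (by omega) ?_
        intro j hj hjl
        rcases hj with hj | hj <;> subst hj
        · exact not_lt.mp hcond.2
        · exact le_refl _
      · rw [if_neg hcond]
        refine main (2 * pos + 1) (by omega) h1 ?_
        intro j hj hjl
        rcases hj with hj | hj <;> subst hj
        · exact le_refl _
        · rcases not_and_or.mp hcond with hbad | hle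
          · exact absurd (by omega : 2 * pos + 1 + 1 < heap.length) hbad
          · exact le_of_lt (not_not.mp hle)
    · rw [if_neg h1]
      have hres := siftdownAux_spec pos (heap.set pos x) pos x
        (by simpa using hpos) (le_refl _)
        (by
          intro i j hj hjl hip hjp
          rw [List.length_set] at hjl
          rw [getD_set_ne _ _ _ _ (fun h => hip h.symm), getD_set_ne _ _ _ _ (fun h => hjp h.symm)]
          exact HA i j hj hjl hip hjp)
        (by intro j hj hjl; rw [List.length_set] at hjl; omega)
        (by intro j hj hjl; rw [List.length_set] at hjl; omega)
      rw [List.set_set] at hres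
      exact hres

theorem getD_mem (l : List Int) (i : Nat) (h : i < l.length) : l.getD i 0 ∈ l := by
  have he : l.getD i 0 = l[i] := by
    simp [List.getD_eq_getElem?_getD, List.getElem?_eq_getElem h]
  rw [he]
  exact List.getElem_mem h

theorem heap_root_min_mem (l : List Int) (h : IsHeap l) : ∀ y ∈ l, l.getD 0 0 ≤ y := by
  intro y hy
  obtain ⟨i, hi, rfl⟩ := List.mem_iff_getElem.mp hy
  have hg : l.getD i 0 = l[i] := by
    simp [List.getD_eq_getElem?_getD, List.getElem?_eq_getElem hi]
  rw [← hg]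
  exact heap_root_min l h i hi

theorem getD_dropLast (l : List Int) (i : Nat) (h : i < l.length - 1) :
    l.dropLast.getD i 0 = l.getD i 0 := by
  have h1 : i < l.dropLast.length := by simp [List.length_dropLast]; omega
  have h2 : i < l.length := by omega
  simp [List.getD_eq_getElem?_getD, List.getElem?_eq_getElem h1, List.getElem?_eq_getElem h2,
    List.getElem_dropLast]

theorem pySiftdownAux_length (fuel : Nat) : ∀ (heap : List Int) (startpos pos : Nat) (newitem : Int),
    (pySiftdownAux fuel heap startpos pos newitem).length = heap.length := by
  induction fuel with
  | zero => intro heap s p x; simp [pySiftdownAux]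
  | succ fuel ih =>
    intro heap s p x
    rw [pySiftdownAux]
    try dsimp only
    split
    · split
      · rw [ih]; simp
      · simp
    · simp

theorem pySiftupLoop_length (fuel : Nat) : ∀ (heap : List Int) (startpos pos endpos : Nat) (newitem : Int),
    (pySiftupLoop fuel heap startpos pos endpos newitem).length = heap.length := by
  induction fuel with
  | zero => intro heap s p e x; simp [pySiftupLoop, pySiftdownAux_length]
  | succ fuel ih =>
    intro heap s p e x
    rw [pySiftupLoop]
    try dsimp only
    split
    · rw [ih]; simp
    · simp [pySiftdownAux_length]

theorem pyHeappop_length (heap : List Int) : (pyHeappop heap).2.length = heap.length - 1 := by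
  unfold pyHeappop pySiftup
  by_cases h : heap.dropLast.isEmpty <;> simp [h, pySiftupLoop_length]

-- heappop on a nonempty heap: returns the root (= minimum), rest is a heap, nothing is lost
theorem heappop_spec (l : List Int) (hne : l ≠ []) (h : IsHeap l) :
    (pyHeappop l).1 = l.getD 0 0 ∧ IsHeap (pyHeappop l).2 ∧
      ((pyHeappop l).1 :: (pyHeappop l).2).Perm l := by
  by_cases hre : l.dropLast.isEmpty
  · -- the singleton case
    have hlen : l.length = 1 := by
      have h0 := List.isEmpty_iff.mp hre
      have h1 : l.dropLast.length = l.length - 1 := by simp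
      have h2 : 0 < l.length := List.length_pos_of_ne_nil hne
      rw [h0] at h1
      simp at h1
      omega
    obtain ⟨a, rfl⟩ := List.length_eq_one_iff.mp hlen
    refine ⟨rfl, ?_, List.Perm.refl _⟩
    intro i j hj hjl
    simp [pyHeappop] at hjl ⊢
  · have hr : l.dropLast ≠ [] := fun hc => hre (by simp [hc])
    have hrlen : 0 < l.dropLast.length := List.length_pos_of_ne_nil hr
    have hllen : 2 ≤ l.length := by
      have hdl : l.dropLast.length = l.length - 1 := by simp
      omega
    have key : pyHeappop l = (l.dropLast.getD 0 0,
        pySiftupLoop (l.dropLast.set 0 (l.getLast?.getD 0)).length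
          (l.dropLast.set 0 (l.getLast?.getD 0)) 0 0
          (l.dropLast.set 0 (l.getLast?.getD 0)).length
          ((l.dropLast.set 0 (l.getLast?.getD 0)).getD 0 0)) := by
      unfold pyHeappop pySiftup
      rw [if_neg (by simpa using hre)]
    set z := l.getLast?.getD 0 with hz
    set l0 := l.dropLast.set 0 z with hl0
    have hl0len : l0.length = l.length - 1 := by simp [hl0]
    have hx : l0.getD 0 0 = z := getD_set_self _ _ _ (by omega)
    have hres := siftupLoop_spec l0.length l0 0 (l0.getD 0 0)
      (by omega) (by omega)
      (by
        intro i j hj hjl hip hjp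
        have hjl' : j < l.length - 1 := by
          rw [hl0, List.length_set] at hjl
          simpa using hjl
        rw [hl0, getD_set_ne _ _ _ _ (fun h => hip h.symm),
          getD_set_ne _ _ _ _ (fun h => hjp h.symm),
          getD_dropLast _ _ (by omega), getD_dropLast _ _ hjl']
        exact h i j hj (by omega))
      (by intro j hj hjl h0; omega)
    have hsetid : l0.set 0 (l0.getD 0 0) = l0 := by
      rw [hx, hl0, List.set_set]
    have hperm0 : (pySiftupLoop l0.length l0 0 0 l0.length (l0.getD 0 0)).Perm l0 := by
      have h2 := hres.2
      rw [hsetid] at h2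
      exact h2
    obtain ⟨m, rt, hrm⟩ : ∃ m rt, l.dropLast = m :: rt := by
      cases hc : l.dropLast with
      | nil => exact absurd hc hr
      | cons m rt => exact ⟨m, rt, rfl⟩
    have hm0 : l.dropLast.getD 0 0 = l.getD 0 0 := getD_dropLast _ _ (by omega)
    have hlsplit : l.dropLast ++ [z] = l := by
      rw [hz, List.getLast?_eq_some_getLast hne, Option.getD_some]
      exact List.dropLast_append_getLast hne
    rw [key]
    refine ⟨hm0, hres.1, ?_⟩
    have step1 : (l.dropLast.getD 0 0 :: pySiftupLoop l0.length l0 0 0 l0.length (l0.getD 0 0)).Perm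
        (l.dropLast.getD 0 0 :: l0) := List.Perm.cons _ hperm0
    refine step1.trans ?_
    have hl0eq : l0 = z :: rt := by rw [hl0, hrm]; rfl
    rw [hl0eq, hrm]
    have hd0 : (m :: rt).getD 0 0 = m := rfl
    rw [hd0, ← hlsplit, hrm]
    show (m :: z :: rt).Perm ((m :: rt) ++ [z])
    exact List.Perm.cons m (List.perm_append_singleton z rt).symm

-- the drain loop of A on a heap produces the ascending sorted sequence of pops
theorem drain_spec (fuel : Nat) :
    ∀ (l : List Int) (c : Int) (acc : List Int), IsHeap l → l.length ≤ fuel →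
      ∃ S : List Int, (pyDrain fuel l c acc).2 = acc ++ S.map (fun s => -s - c) ∧
        S.Perm l ∧ S.Pairwise (· ≤ ·) := by
  induction fuel with
  | zero =>
    intro l c acc h hl
    have : l = [] := List.eq_nil_of_length_eq_zero (by omega)
    subst this
    exact ⟨[], by simp [pyDrain], List.Perm.refl _, List.Pairwise.nil⟩
  | succ fuel ih =>
    intro l c acc h hl
    rw [pyDrain]
    try dsimp only
    by_cases he : l.isEmpty
    · rw [if_pos he]
      rw [List.isEmpty_iff.mp he]
      exact ⟨[], by simp, List.Perm.refl _, List.Pairwise.nil⟩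
    · rw [if_neg he]
      have hne : l ≠ [] := by simpa [List.isEmpty_iff] using he
      obtain ⟨h1, h2, h3⟩ := heappop_spec l hne h
      have hlpos := List.length_pos_of_ne_nil hne
      obtain ⟨S', hS'2, hS'p, hS's⟩ := ih (pyHeappop l).2 c (acc ++ [(-(pyHeappop l).1) - c]) h2
        (by rw [pyHeappop_length]; omega)
      refine ⟨(pyHeappop l).1 :: S', ?_, ?_, ?_⟩
      · rw [hS'2, List.map_cons, List.append_assoc]
        rfl
      · exact (List.Perm.cons _ hS'p).trans h3
      · refine List.pairwise_cons.mpr ⟨?_, hS's⟩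
        intro s hs
        have hsl : s ∈ l := h3.mem_iff.mp (List.mem_cons_of_mem _ (hS'p.mem_iff.mp hs))
        rw [h1]
        exact heap_root_min_mem l h s hsl

-- pushing a value no smaller than everything in the heap just appends it
theorem heappush_max (h : List Int) (x : Int) (hb : ∀ y ∈ h, y ≤ x) :
    pyHeappush h x = h ++ [x] := by
  unfold pyHeappush
  have hlen : (h ++ [x]).length - 1 = h.length := by simp
  rw [hlen]
  cases hn : h.length with
  | zero =>
    have : h = [] := List.eq_nil_of_length_eq_zero hn
    subst this
    simp [pySiftdownAux]
  | succ n =>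
    rw [pySiftdownAux]
    try dsimp only
    rw [if_pos (by omega : 0 < n + 1)]
    have hidx : (n + 1 - 1) / 2 < h.length := by omega
    have hidx2 : n / 2 < h.length := by omega
    have hpar : (h ++ [x]).getD ((n + 1 - 1) / 2) 0 = h.getD ((n + 1 - 1) / 2) 0 := by
      simp [List.getD_eq_getElem?_getD, List.getElem?_append_left hidx2]
    rw [if_neg (by
      rw [hpar]
      exact not_lt.mpr (hb _ (getD_mem h _ hidx)))]
    rw [← hn, List.set_append]
    simp

-- folding pushes of an ascending run over an accumulator bounded by it appends the run
theorem foldl_push_sorted :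
    ∀ (V acc : List Int), V.Pairwise (· ≤ ·) → (∀ y ∈ acc, ∀ v ∈ V, y ≤ v) →
      V.foldl (fun h v => pyHeappush h v) acc = acc ++ V := by
  intro V
  induction V with
  | nil => intro acc _ _; simp
  | cons v V' ih =>
    intro acc hpw hb
    rw [List.foldl_cons]
    have hps := List.pairwise_cons.mp hpw
    rw [heappush_max acc v (fun y hy => hb y hy v List.mem_cons_self)]
    rw [ih (acc ++ [v]) hps.2 (by
      intro y hy v' hv'
      rcases List.mem_append.mp hy with hy | hy
      · exact hb y hy v' (List.mem_cons_of_mem _ hv')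
      · rw [List.mem_singleton.mp hy]
        exact hps.1 v' hv')]
    rw [List.append_assoc]
    rfl

-- the drained-out queue is always empty when the fuel covers the length
theorem pyDrain_fst (fuel : Nat) : ∀ (q : List Int) (c : Int) (acc : List Int),
    q.length ≤ fuel → (pyDrain fuel q c acc).1 = [] := by
  induction fuel with
  | zero =>
    intro q c acc hq
    have hq0 : q = [] := List.eq_nil_of_length_eq_zero (by omega)
    simp [pyDrain, hq0]
  | succ fuel ih =>
    intro q c acc hq
    rw [pyDrain]
    by_cases h1 : q.isEmpty
    · rw [if_pos h1]
      exact List.isEmpty_iff.mp h1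
    · rw [if_neg h1]
      have hql := List.length_pos_of_ne_nil (by simpa [List.isEmpty_iff] using h1)
      exact ih _ _ _ (by rw [pyHeappop_length]; omega)

-- ===== VERDICT (by name: the statement is the Claim_ definition above) =====
theorem interval_spec : Claim_equal_interval := by
  intro queue consumption _ hpre
  unfold Spec_interval interval interval_alt
  have hheap := (pre_iff_isHeap queue consumption).mp hpre
  obtain ⟨S, hS2, hSperm, hSsort⟩ := drain_spec queue.length queue consumption [] hheap le_rfl
  rw [hS2, pyDrain_fst queue.length queue consumption [] le_rfl]
  simp only [List.nil_append, List.foldl_map]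
  have hstep : (fun (h : List Int) (s : Int) => pyHeappush h (-(-s - consumption)))
      = fun h s => pyHeappush h (s + consumption) := by
    funext h s; congr 1; ring
  rw [hstep]
  have := foldl_push_sorted (S.map (fun s => s + consumption)) []
    (List.Pairwise.map _ (by intro a b hab; exact by omega) hSsort)
    (by intro y hy; simp at hy)
  rw [List.foldl_map] at this
  rw [this, List.nil_append]
  have hperm2 : (S.map (fun s => s + consumption)).Perm (queue.map (fun v => v + consumption)) :=
    hSperm.map (fun s => s + consumption)
  have hpw2 : (S.map (fun s => s + consumption)).Pairwise (· ≤ ·) :=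
    List.Pairwise.map _ (by intro a b hab; omega) hSsort
  exact (PySem.List.sorted_id_eq_of_perm_of_pairwise (queue.map (fun v => v + consumption)) (S.map (fun s => s + consumption)) hperm2 hpw2).symm
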